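-- pv_equiv track=rewrite | github.com/Sahil-1807/tathastu_week_of_code | day5/program1.py | addvalue
-- ===== SOURCE A (Python) =====
-- def addvalue(number):
--     result=0
--     decimalplace=1
--
--     if number==0:
--         result+=(5*decimalplace)
--
--     while number>0:
--         if number%10==0:
--             result+=(5*decimalplace)
--
--         number//=10
--         decimalplace*=10
--     return result
-- ===== SOURCE B (Python) =====
-- def addvalue(number):
--     if number < 0:
--         return 0
--     s = str(number)
--     n = len(s)
--     return sum(5 * 10 ** (n - 1 - i) for i in range(n) if s[i] == '0')
-- ===== Notes on version B (the rewrite author's own statement) =====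
-- stated objective: idiomatic
-- what changed: B scans the decimal string representation left-to-right, adding five times the place value (computed by exponentiation from the position) for each zero character, instead of A's right-to-left digit extraction with floor division and modulo and a running place-value multiplier.
import Mathlib
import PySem

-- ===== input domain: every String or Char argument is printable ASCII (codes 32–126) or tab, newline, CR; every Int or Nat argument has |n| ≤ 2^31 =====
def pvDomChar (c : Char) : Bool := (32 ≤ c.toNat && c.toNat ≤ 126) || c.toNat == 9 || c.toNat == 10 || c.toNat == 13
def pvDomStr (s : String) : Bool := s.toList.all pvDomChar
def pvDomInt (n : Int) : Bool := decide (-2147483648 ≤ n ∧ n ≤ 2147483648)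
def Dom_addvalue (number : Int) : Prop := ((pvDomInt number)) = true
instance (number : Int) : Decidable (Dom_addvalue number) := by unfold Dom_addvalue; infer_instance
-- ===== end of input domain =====

-- B scans the decimal string left-to-right adding 5*10^(n-1-i) per '0' character,
-- instead of A's right-to-left //10 %10 extraction with a running multiplier (objective: idiomatic).

-- ===== PORT A =====
-- the while loop of A, with state (number, result, decimalplace)
def addvalueLoop (number result decimalplace : Int) : Int :=
  if number > 0 then
    addvalueLoop (PySem.Int.floordiv number 10)
      (if PySem.Int.mod number 10 = 0 then result + 5 * decimalplace else result)
      (decimalplace * 10)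
  else result
termination_by number.toNat
decreasing_by
  have h10 : PySem.Int.floordiv number 10 = number / 10 :=
    PySem.Int.floordiv_eq_ediv_of_pos (by omega)
  rw [h10]; omega

def addvalue (number : Int) : Int :=
  -- result = 0; if number == 0: result += 5*1; then the while loop with decimalplace = 1
  addvalueLoop number (if number = 0 then 0 + 5 * 1 else 0) 1

-- ===== PORT B =====
def addvalue_alt (number : Int) : Int :=
  if number < 0 then 0
  else
    -- s = str(number); n = len(s); sum(5 * 10**(n-1-i) for i in range(n) if s[i] == '0')
    ((List.range (PySem.Int.toChars number).length).map (fun i =>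
      if (PySem.Int.toChars number).getD i ' ' = '0' then
        (5 : Int) * 10 ^ ((PySem.Int.toChars number).length - 1 - i) else 0)).sum

-- ===== PRECONDITION & SPEC =====
def Spec_addvalue (number : Int) (out : Int) : Prop := out = addvalue_alt number
instance (number : Int) (out : Int) : Decidable (Spec_addvalue number out) := by unfold Spec_addvalue; infer_instance

-- ===== CLAIM (what is proved, stated in full; the proofs are below) =====
def Claim_equal_addvalue : Prop := ∀ (number : Int), Dom_addvalue number → Spec_addvalue number (addvalue number)

-- ===== LEMMAS AND PROOFS =====

-- value of a digit string under B's summation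
def bsum (cs : List Char) : Int :=
  ((List.range cs.length).map (fun i =>
    if cs.getD i ' ' = '0' then (5 : Int) * 10 ^ (cs.length - 1 - i) else 0)).sum

-- abstract value A's loop computes (little-endian digit recursion)
def gval (m : Nat) : Int :=
  if h : m = 0 then 0
  else (if m % 10 = 0 then 5 else 0) + 10 * gval (m / 10)
decreasing_by exact Nat.div_lt_self (Nat.pos_of_ne_zero h) (by norm_num)

theorem gval_zero : gval 0 = 0 := by rw [gval]; rfl

theorem gval_pos {m : Nat} (h : m ≠ 0) :
    gval m = (if m % 10 = 0 then 5 else 0) + 10 * gval (m / 10) := by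
  rw [gval, dif_neg h]

-- big-endian digit characters of m (empty for 0)
def dchars (m : Nat) : List Char :=
  if h : m = 0 then []
  else dchars (m / 10) ++ [Nat.digitChar (m % 10)]
decreasing_by exact Nat.div_lt_self (Nat.pos_of_ne_zero h) (by norm_num)

theorem dchars_zero : dchars 0 = [] := by rw [dchars]; rfl

theorem dchars_pos {m : Nat} (h : m ≠ 0) :
    dchars m = dchars (m / 10) ++ [Nat.digitChar (m % 10)] := by
  rw [dchars, dif_neg h]

theorem addvalueLoop_eq (m : Nat) : ∀ r dp : Int, addvalueLoop (m : Int) r dp = r + dp * gval m := by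
  induction m using Nat.strong_induction_on with
  | _ m ih =>
    intro r dp
    rcases Nat.eq_zero_or_pos m with h0 | hpos
    · subst h0
      rw [addvalueLoop, gval_zero]; simp
    · rw [addvalueLoop]
      have hgt : (m : Int) > 0 := by exact_mod_cast hpos
      rw [if_pos hgt]
      have hdiv : PySem.Int.floordiv (m : Int) 10 = ((m / 10 : Nat) : Int) := by
        exact_mod_cast PySem.Int.floordiv_natCast m 10
      have hmod : PySem.Int.mod (m : Int) 10 = ((m % 10 : Nat) : Int) := by
        exact_mod_cast PySem.Int.mod_natCast m 10
      rw [hdiv, hmod, ih (m / 10) (Nat.div_lt_self hpos (by norm_num)),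
        gval_pos (Nat.pos_iff_ne_zero.mp hpos)]
      simp only [Int.natCast_eq_zero]
      split_ifs <;> ring

theorem bsum_append (cs : List Char) (c : Char) :
    bsum (cs ++ [c]) = 10 * bsum cs + (if c = '0' then 5 else 0) := by
  unfold bsum
  simp only [List.length_append, List.length_singleton, List.range_succ, List.map_append,
    List.sum_append, List.map_cons, List.map_nil, List.sum_cons, List.sum_nil]
  have hlast : (cs ++ [c]).getD cs.length ' ' = c := by
    simp [List.getD_eq_getElem?_getD]
  rw [hlast]
  have hmap : ∀ i ∈ List.range cs.length,
      (if (cs ++ [c]).getD i ' ' = '0' then (5 : Int) * 10 ^ (cs.length + 1 - 1 - i) else 0)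
      = 10 * (if cs.getD i ' ' = '0' then (5 : Int) * 10 ^ (cs.length - 1 - i) else 0) := by
    intro i hi
    rw [List.mem_range] at hi
    have hget : (cs ++ [c]).getD i ' ' = cs.getD i ' ' := by
      simp [List.getD_eq_getElem?_getD, List.getElem?_append_left hi]
    rw [hget]
    by_cases h0 : cs.getD i ' ' = '0'
    · rw [if_pos h0, if_pos h0]
      have he : cs.length + 1 - 1 - i = (cs.length - 1 - i) + 1 := by omega
      rw [he, pow_succ]; ring
    · rw [if_neg h0, if_neg h0]; ring
  rw [List.map_congr_left hmap, List.sum_map_mul_left]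
  have h0 : cs.length + 1 - 1 - cs.length = 0 := by omega
  rw [h0]
  split_ifs <;> ring

theorem digitChar_eq_zero_iff (d : Nat) (hd : d < 10) : Nat.digitChar d = '0' ↔ d = 0 := by
  interval_cases d <;> simp [Nat.digitChar]

theorem bsum_dchars (m : Nat) : bsum (dchars m) = gval m := by
  induction m using Nat.strong_induction_on with
  | _ m ih =>
    rcases Nat.eq_zero_or_pos m with h0 | hpos
    · subst h0; rw [dchars_zero, gval_zero]; rfl
    · have hm0 : m ≠ 0 := Nat.pos_iff_ne_zero.mp hpos
      rw [dchars_pos hm0, bsum_append,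
        ih (m / 10) (Nat.div_lt_self hpos (by norm_num)), gval_pos hm0]
      simp only [digitChar_eq_zero_iff (m % 10) (Nat.mod_lt m (by norm_num))]
      ring

-- Nat.toDigits 10 m is ['0'] for 0 and dchars m otherwise
theorem toDigitsCore_eq (fuel : Nat) : ∀ (m : Nat) (acc : List Char), m < fuel →
    Nat.toDigitsCore 10 fuel m acc = (if m = 0 then ['0'] else dchars m) ++ acc := by
  induction fuel with
  | zero => intro m acc h; omega
  | succ fuel ih =>
    intro m acc h
    rw [Nat.toDigitsCore]
    by_cases hz : m / 10 = 0
    · rw [if_pos hz]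
      by_cases h0 : m = 0
      · subst h0; simp [Nat.digitChar]
      · rw [if_neg h0, dchars_pos h0, hz, dchars_zero]
        simp
    · rw [if_neg hz]
      have hm0 : m ≠ 0 := by intro h'; subst h'; simp at hz
      have hlt : m / 10 < fuel := by
        have := Nat.div_lt_self (Nat.pos_of_ne_zero hm0) (show 1 < 10 by norm_num)
        omega
      rw [ih (m / 10) _ hlt, if_neg hz, if_neg hm0, dchars_pos hm0, List.append_assoc]
      rfl

theorem toDigits_eq (m : Nat) :
    Nat.toDigits 10 m = if m = 0 then ['0'] else dchars m := by
  rw [Nat.toDigits]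
  have := toDigitsCore_eq (m + 1) m [] (by omega)
  simpa using this

theorem alt_eq_bsum (m : Nat) :
    addvalue_alt ((m : Nat) : Int) = bsum (Nat.toDigits 10 m) := by
  have htc : PySem.Int.toChars ((m : Nat) : Int) = Nat.toDigits 10 m := by
    simp [PySem.Int.toChars]
  rw [addvalue_alt, if_neg (by omega : ¬ ((m : Nat) : Int) < 0), htc]
  rfl

-- ===== VERDICT (by name: the statement is the Claim_ definition above) =====
theorem addvalue_spec : Claim_equal_addvalue := by
  intro number _
  unfold Spec_addvalue
  rcases lt_trichotomy number 0 with hneg | h0 | hpos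
  · rw [addvalue, if_neg (by omega : ¬ number = 0), addvalueLoop, if_neg (by omega),
      addvalue_alt, if_pos hneg]
  · subst h0
    rw [addvalue, if_pos rfl,
      show (0 : Int) = ((0 : Nat) : Int) from rfl, addvalueLoop_eq 0, gval_zero,
      alt_eq_bsum 0, toDigits_eq, if_pos rfl]
    rfl
  · rw [addvalue, if_neg (by omega : ¬ number = 0)]
    have hcast : number = ((number.toNat : Nat) : Int) := by omega
    have hm0 : number.toNat ≠ 0 := by omega
    rw [hcast, addvalueLoop_eq number.toNat 0 1, alt_eq_bsum number.toNat,
      toDigits_eq, if_neg hm0, bsum_dchars]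
    ring
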